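-- pv_equiv track=rewrite | github.com/tarunganesh2004/Leetcode | LC Mothly/2025/February/15th_feb.py | optimizedWay
-- ===== SOURCE A (Python) =====
-- def optimizedWay(n):
--     ans=0 # precomputed
--     l = [0, 1, 9, 10, 36, 45, 55, 82, 91, 99, 100, 235, 297, 369, 370, 379, 414, 657, 675, 703, 756, 792, 909, 918, 945, 964, 990, 991, 999, 1000]  # noqa: E741
--     for i in l:
--         if i>n:
--             break
--         ans+=i*i
--     return ans
-- ===== SOURCE B (Python) =====
-- _L = [0, 1, 9, 10, 36, 45, 55, 82, 91, 99, 100, 235, 297, 369, 370, 379, 414, 657, 675, 703, 756, 792, 909, 918, 945, 964, 990, 991, 999, 1000]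
--
-- def optimizedWay(n):
--     # binary search (bisect_right) for the number of table entries <= n,
--     # then sum the squares of that prefix
--     lo, hi = 0, len(_L)
--     while lo < hi:
--         mid = (lo + hi) // 2
--         if _L[mid] <= n:
--             lo = mid + 1
--         else:
--             hi = mid
--     return sum(x * x for x in _L[:lo])
-- ===== Notes on version B (the rewrite author's own statement) =====
-- stated objective: alternative
-- what changed: Replaces the linear scan with early break by a bisect_right-style binary search for the cutoff index over the sorted constant table, then sums squares over that prefix in a separate pass.
import Mathlib
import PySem

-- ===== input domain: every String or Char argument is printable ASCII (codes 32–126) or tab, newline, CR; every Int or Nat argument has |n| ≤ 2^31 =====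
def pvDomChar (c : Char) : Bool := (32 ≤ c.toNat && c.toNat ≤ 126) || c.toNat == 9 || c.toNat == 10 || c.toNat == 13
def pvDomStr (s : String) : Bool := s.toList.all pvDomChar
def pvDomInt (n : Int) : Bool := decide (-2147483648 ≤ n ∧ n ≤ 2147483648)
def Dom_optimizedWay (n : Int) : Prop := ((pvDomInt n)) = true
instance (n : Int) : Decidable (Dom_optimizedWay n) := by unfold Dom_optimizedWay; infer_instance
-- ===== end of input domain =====

-- B finds the cutoff index with a bisect_right-style binary search over the sorted
-- constant table, then sums squares over that prefix (alternative structure, same values).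
-- ===== PORT A =====
def pvTable : List Int := [0, 1, 9, 10, 36, 45, 55, 82, 91, 99, 100, 235, 297, 369, 370, 379, 414, 657, 675, 703, 756, 792, 909, 918, 945, 964, 990, 991, 999, 1000]

def pvLoopA (n : Int) : List Int → Int → Int
  | [], ans => ans
  | i :: rest, ans => if i > n then ans else pvLoopA n rest (ans + i * i)

def optimizedWay (n : Int) : Int := pvLoopA n pvTable 0

-- ===== PORT B =====
-- bisect_right-style binary search: number of entries ≤ n
def pvBisect (n : Int) (l : List Int) (lo hi : Nat) : Nat :=
  if _h : lo < hi then
    let mid := (lo + hi) / 2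
    if l.getD mid 0 ≤ n then pvBisect n l (mid + 1) hi
    else pvBisect n l lo mid
  else lo
termination_by hi - lo
decreasing_by all_goals omega

def optimizedWay_alt (n : Int) : Int :=
  ((pvTable.take (pvBisect n pvTable 0 pvTable.length)).map (fun x => x * x)).sum

-- ===== PRECONDITION & SPEC =====
def Spec_optimizedWay (n : Int) (out : Int) : Prop := out = optimizedWay_alt n
instance (n : Int) (out : Int) : Decidable (Spec_optimizedWay n out) := by unfold Spec_optimizedWay; infer_instance

-- ===== CLAIM (what is proved, stated in full; the proofs are below) =====
def Claim_equal_optimizedWay : Prop := ∀ (n : Int), Dom_optimizedWay n → Spec_optimizedWay n (optimizedWay n)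

-- ===== LEMMAS AND PROOFS =====
lemma pvLoopA_takeWhile (n : Int) : ∀ (l : List Int) (ans : Int),
    pvLoopA n l ans = ans + ((l.takeWhile (fun i => decide (i ≤ n))).map (fun x => x * x)).sum := by
  intro l
  induction l with
  | nil => intro ans; simp [pvLoopA]
  | cons i rest ih =>
    intro ans
    by_cases hin : i > n
    · simp [pvLoopA, hin, show decide (i ≤ n) = false from by simp; omega]
    · rw [show List.takeWhile (fun i => decide (i ≤ n)) (i :: rest)
            = i :: List.takeWhile (fun i => decide (i ≤ n)) rest from by
          simp [List.takeWhile_cons]; omega]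
      simp only [pvLoopA, if_neg hin, ih, List.map_cons, List.sum_cons]
      ring

lemma pvTakeWhile_length_eq (p : Int → Bool) : ∀ (l : List Int) (k : Nat), k ≤ l.length →
    (∀ i, i < k → p (l.getD i 0) = true) →
    (∀ _hk : k < l.length, p (l.getD k 0) = false) →
    (l.takeWhile p).length = k := by
  intro l
  induction l with
  | nil => intro k hk _ _; simp at hk; simp [hk]
  | cons a rest ih =>
    intro k hk h1 h2
    cases k with
    | zero =>
      have h0 : p a = false := by simpa using h2 (by simp)
      simp [h0]
    | succ k' =>
      have ha : p a = true := by simpa using h1 0 (by omega)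
      have hr : (rest.takeWhile p).length = k' := by
        apply ih
        · simp at hk; omega
        · intro i hi; simpa using h1 (i + 1) (by omega)
        · intro hk'; simpa using h2 (by simp; omega)
      simp [ha, hr]

lemma pvBisect_stop (n : Int) (l : List Int) (lo hi : Nat) (h : ¬ lo < hi) :
    pvBisect n l lo hi = lo := by
  rw [pvBisect]; simp [h]

lemma pvBisect_done (n : Int) (l : List Int) (lo : Nat) (hlo : lo ≤ l.length)
    (h1 : ∀ i, i < lo → l.getD i 0 ≤ n)
    (h2 : ∀ i, lo ≤ i → i < l.length → n < l.getD i 0) :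
    (l.takeWhile (fun i => decide (i ≤ n))).length = lo := by
  apply pvTakeWhile_length_eq _ l lo hlo
  · intro i hi; simpa using h1 i hi
  · intro hk
    have h := h2 lo (le_refl _) hk
    simp only [decide_eq_false_iff_not]
    omega

lemma pvSorted_getD_le (l : List Int) (hs : List.Pairwise (· ≤ ·) l)
    (i j : Nat) (hij : i ≤ j) (hj : j < l.length) : l.getD i 0 ≤ l.getD j 0 := by
  rcases Nat.eq_or_lt_of_le hij with rfl | hlt
  · exact le_refl _
  · rw [List.getD_eq_getElem l 0 (by omega), List.getD_eq_getElem l 0 hj]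
    exact List.pairwise_iff_getElem.mp hs i j (by omega) hj hlt

lemma pvBisect_spec (n : Int) (l : List Int) (hs : List.Pairwise (· ≤ ·) l) :
    ∀ (d lo hi : Nat), hi - lo ≤ d → lo ≤ hi → hi ≤ l.length →
    (∀ i, i < lo → l.getD i 0 ≤ n) →
    (∀ i, hi ≤ i → i < l.length → n < l.getD i 0) →
    pvBisect n l lo hi = (l.takeWhile (fun i => decide (i ≤ n))).length := by
  intro d
  induction d with
  | zero =>
    intro lo hi hd hlh hhl h1 h2
    have hstop : ¬ lo < hi := by omega
    rw [pvBisect_stop n l lo hi hstop,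
      pvBisect_done n l lo (by omega) h1 (fun i hi1 hi2 => h2 i (by omega) hi2)]
  | succ d ih =>
    intro lo hi hd hlh hhl h1 h2
    by_cases hlt : lo < hi
    · rw [pvBisect, dif_pos hlt]
      show (if l.getD ((lo + hi) / 2) 0 ≤ n then pvBisect n l ((lo + hi) / 2 + 1) hi
            else pvBisect n l lo ((lo + hi) / 2)) = _
      by_cases hc : l.getD ((lo + hi) / 2) 0 ≤ n
      · rw [if_pos hc]
        apply ih ((lo + hi) / 2 + 1) hi (by omega) (by omega) hhl
        · intro i hi1
          exact le_trans (pvSorted_getD_le l hs i ((lo + hi) / 2) (by omega) (by omega)) hc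
        · exact h2
      · rw [if_neg hc]
        apply ih lo ((lo + hi) / 2) (by omega) (by omega) (by omega) h1
        · intro i hi1 hi2
          exact lt_of_lt_of_le (by omega) (pvSorted_getD_le l hs ((lo + hi) / 2) i hi1 hi2)
    · rw [pvBisect_stop n l lo hi hlt,
        pvBisect_done n l lo (by omega) h1 (fun i hi1 hi2 => h2 i (by omega) hi2)]

lemma pvTable_sorted : List.Pairwise (· ≤ ·) pvTable := by decide

-- ===== VERDICT (by name: the statement is the Claim_ definition above) =====
theorem optimizedWay_spec : Claim_equal_optimizedWay := by
  intro n _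
  unfold Spec_optimizedWay optimizedWay optimizedWay_alt
  rw [pvLoopA_takeWhile,
    pvBisect_spec n pvTable pvTable_sorted pvTable.length 0 pvTable.length (by omega) (by omega)
      (le_refl _) (fun i hi => absurd hi (by omega)) (fun i hi1 hi2 => absurd (by omega : ¬ (pvTable.length ≤ i ∧ i < pvTable.length)) (by exact fun h => h ⟨hi1, hi2⟩)),
    (List.prefix_iff_eq_take.mp (List.takeWhile_prefix _)).symm]
  simp
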